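-- pv_equiv track=rewrite | github.com/ArchitGupta16/Computer-Network | CheckSum_Bits.py | wrapsum
-- ===== SOURCE A (Python) =====
-- def wrapsum(binary_num, bits):
--     binary_split = []
--     if len(binary_num) > bits:
--         count = bits
--         n = len(binary_num) - bits
--         while count != len(binary_num):
--             count += n
--             binary_split.append(binary_num[:n])
--             binary_split.append(binary_num[n:])
--             n = len(binary_split[0])
--     else:
--         binary_split.append(binary_num)
--     return binary_split
-- ===== SOURCE B (Python) =====
-- def wrapsum(binary_num, bits):
--     if len(binary_num) <= bits:
--         return [binary_num]
--     cut = len(binary_num) - bits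
--     head, tail = [], []
--     for i, ch in enumerate(binary_num):
--         (head if i < cut else tail).append(ch)
--     return [''.join(head), ''.join(tail)]
-- ===== Notes on version B (the rewrite author's own statement) =====
-- stated objective: alternative
-- what changed: A builds the two chunks by slicing inside a while loop that always runs exactly once; B never slices: it makes a single character-by-character pass, routing each character into a head or tail accumulator by comparing its index with the split point, then joins the two accumulators.
import Mathlib
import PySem

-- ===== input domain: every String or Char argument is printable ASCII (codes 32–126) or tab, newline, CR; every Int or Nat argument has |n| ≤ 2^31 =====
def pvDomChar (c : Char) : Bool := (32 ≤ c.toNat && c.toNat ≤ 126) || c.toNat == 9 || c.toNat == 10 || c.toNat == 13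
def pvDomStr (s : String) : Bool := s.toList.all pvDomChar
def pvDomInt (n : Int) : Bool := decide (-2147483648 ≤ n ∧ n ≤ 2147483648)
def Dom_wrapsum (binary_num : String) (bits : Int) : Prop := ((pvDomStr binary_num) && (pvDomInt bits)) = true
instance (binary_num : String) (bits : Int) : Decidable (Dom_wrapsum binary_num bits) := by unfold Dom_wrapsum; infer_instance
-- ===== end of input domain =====

-- B replaces A's slice-in-a-loop construction by a single per-character pass that partitions
-- characters into head/tail accumulators by index; objective: alternative (same cost).

-- ===== PORT A =====
-- A's while loop, with fuel as a totality guard only (the loop body raises count to len, so it exits after one pass).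
def wrapsumLoop (binary_num : String) (fuel : Nat) (count n : Int) (binary_split : List String) : List String :=
  match fuel with
  | 0 => binary_split
  | f + 1 =>
    if count ≠ PySem.Str.len binary_num then
      let count' := count + n
      let acc := binary_split ++ [PySem.Str.slice binary_num none (some n)]
      let acc := acc ++ [PySem.Str.slice binary_num (some n) none]
      -- n = len(binary_split[0]); the list is nonempty here, so pyGet? returns some
      let n' := PySem.Str.len ((PySem.List.pyGet? acc 0).getD "")
      wrapsumLoop binary_num f count' n' acc
    else binary_split

def wrapsum (binary_num : String) (bits : Int) : List String :=
  if PySem.Str.len binary_num > bits then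
    wrapsumLoop binary_num (binary_num.toList.length + 2) bits (PySem.Str.len binary_num - bits) []
  else [binary_num]

-- ===== PORT B =====
-- the for-loop over enumerate(binary_num): each char goes to head or tail by index
def wrapsum_alt (binary_num : String) (bits : Int) : List String :=
  if PySem.Str.len binary_num ≤ bits then [binary_num]
  else
    let cut := PySem.Str.len binary_num - bits
    let p := (PySem.List.enumerate binary_num.toList 0).foldl
      (fun (acc : List Char × List Char) (q : Int × Char) =>
        if q.1 < cut then (acc.1 ++ [q.2], acc.2) else (acc.1, acc.2 ++ [q.2]))
      ([], [])
    [String.ofList p.1, String.ofList p.2]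

-- ===== PRECONDITION & SPEC =====
def Spec_wrapsum (binary_num : String) (bits : Int) (out : List String) : Prop := out = wrapsum_alt binary_num bits
instance (binary_num : String) (bits : Int) (out : List String) : Decidable (Spec_wrapsum binary_num bits out) := by unfold Spec_wrapsum; infer_instance

-- ===== CLAIM (what is proved, stated in full; the proofs are below) =====
def Claim_equal_wrapsum : Prop := ∀ (binary_num : String) (bits : Int), Dom_wrapsum binary_num bits → Spec_wrapsum binary_num bits (wrapsum binary_num bits)

-- ===== LEMMAS AND PROOFS =====
-- A's loop exits after one iteration: count + n = len makes the second test fail.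
theorem wrapsumLoop_once (s : String) (f : Nat) (count n : Int)
    (h : count ≠ PySem.Str.len s) (h2 : count + n = PySem.Str.len s) :
    wrapsumLoop s (f + 2) count n [] =
      [PySem.Str.slice s none (some n), PySem.Str.slice s (some n) none] := by
  unfold wrapsumLoop
  simp only [if_pos h]
  unfold wrapsumLoop
  simp [h2]

-- B's fold partitions a list with increasing indices into take/drop at the split point.
theorem foldl_partition (l : List Char) (cut : Int) :
    ∀ (s : Int) (h t : List Char),
    (PySem.List.enumerate l s).foldl
      (fun (acc : List Char × List Char) (q : Int × Char) =>
        if q.1 < cut then (acc.1 ++ [q.2], acc.2) else (acc.1, acc.2 ++ [q.2]))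
      (h, t)
    = (h ++ l.take (cut - s).toNat, t ++ l.drop (cut - s).toNat) := by
  induction l with
  | nil => intro s h t; simp [PySem.List.enumerate_nil]
  | cons x xs ih =>
    intro s h t
    rw [PySem.List.enumerate_cons]
    simp only [List.foldl_cons]
    by_cases hs : s < cut
    · rw [if_pos hs, ih (s + 1)]
      have : (cut - s).toNat = (cut - (s + 1)).toNat + 1 := by omega
      simp [this]
    · rw [if_neg hs, ih (s + 1)]
      have h0 : (cut - s).toNat = 0 := by omega
      have h1 : (cut - (s + 1)).toNat = 0 := by omega
      simp [h0, h1]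

-- ===== VERDICT (by name: the statement is the Claim_ definition above) =====
theorem wrapsum_spec : Claim_equal_wrapsum := by
  intro s bits _
  unfold Spec_wrapsum wrapsum wrapsum_alt
  by_cases h : PySem.Str.len s > bits
  · rw [if_pos h, if_neg (by omega)]
    rw [wrapsumLoop_once s s.toList.length bits (PySem.Str.len s - bits) (by omega) (by omega)]
    dsimp only
    rw [foldl_partition]
    have hn : (0:Int) ≤ PySem.Str.len s - bits := by
      simp only [PySem.Str.len_eq] at h ⊢
      omega
    simp only [PySem.Str.len_eq, String.length_toList] at hn
    simp [PySem.Str.slice, PySem.List.slice_to _ hn, PySem.List.slice_from _ hn]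
  · rw [if_neg h, if_pos (by omega)]
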